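-- pv_equiv track=rewrite | github.com/shokokb/personal-study | env/opt/data_structures/binary_tree.py | mydepth
-- ===== SOURCE A (Python) =====
-- def mydepth(tree):
--     d = 0
--     l = len(tree)
--     while d < l:
--         if (2 ** d - 1 > l):
--
--             break
--         d += 1
--     return d
-- ===== SOURCE B (Python) =====
-- def mydepth(tree):
--     l = len(tree)
--     return min(l, (l + 1).bit_length())
-- ===== Notes on version B (the rewrite author's own statement) =====
-- stated objective: simpler
-- what changed: Replaced the incrementing while-loop with bigint powers by the closed form min(len(tree), (len(tree)+1).bit_length()).
import Mathlib
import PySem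

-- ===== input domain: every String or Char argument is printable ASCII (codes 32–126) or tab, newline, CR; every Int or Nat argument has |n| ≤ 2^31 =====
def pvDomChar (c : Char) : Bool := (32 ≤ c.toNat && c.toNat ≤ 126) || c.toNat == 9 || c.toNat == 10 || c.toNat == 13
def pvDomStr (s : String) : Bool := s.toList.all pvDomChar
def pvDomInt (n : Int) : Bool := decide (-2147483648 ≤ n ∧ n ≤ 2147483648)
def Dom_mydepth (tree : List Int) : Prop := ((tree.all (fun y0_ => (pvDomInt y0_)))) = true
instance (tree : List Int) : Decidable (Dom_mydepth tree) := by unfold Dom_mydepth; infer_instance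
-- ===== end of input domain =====

-- ===== PORT A =====
-- Literal port of A's while-loop: fuel = l - d keeps the loop total.
def mydepthGo (l : Nat) : Nat → Nat → Nat
  | 0, d => d
  | fuel + 1, d => if (2:Int) ^ d - 1 > (l : Int) then d else mydepthGo l fuel (d + 1)

def mydepth (tree : List Int) : Int :=
  ((mydepthGo tree.length tree.length 0 : Nat) : Int)

-- ===== PORT B =====
-- Port of Source B: min(l, (l+1).bit_length()); for m ≥ 1, m.bit_length() = Nat.log2 m + 1.
def mydepth_alt (tree : List Int) : Int :=
  let l := tree.length
  ((min l (Nat.log2 (l + 1) + 1) : Nat) : Int)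

-- ===== PRECONDITION & SPEC =====
def Spec_mydepth (tree : List Int) (out : Int) : Prop := out = mydepth_alt tree
instance (tree : List Int) (out : Int) : Decidable (Spec_mydepth tree out) := by unfold Spec_mydepth; infer_instance

-- ===== CLAIM (what is proved, stated in full; the proofs are below) =====
def Claim_equal_mydepth : Prop := ∀ (tree : List Int), Dom_mydepth tree → Spec_mydepth tree (mydepth tree)

-- ===== LEMMAS AND PROOFS =====

-- The loop's break test is "2^d > l+1", i.e. "Nat.log2 (l+1) + 1 ≤ d".
theorem pv_cond_iff (l d : Nat) :
    ((2:Int) ^ d - 1 > (l : Int)) ↔ Nat.log2 (l + 1) + 1 ≤ d := by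
  have h : Nat.log2 (l + 1) < d ↔ l + 1 < 2 ^ d :=
    Nat.log2_lt (by omega)
  have hcast : ((2:Int) ^ d - 1 > (l : Int)) ↔ l + 1 < 2 ^ d := by
    rw [show ((2:Int) ^ d) = ((2 ^ d : Nat) : Int) by push_cast; ring]
    omega
  omega

theorem pv_go_eq (l : Nat) : ∀ (fuel d : Nat),
    mydepthGo l fuel d = min (d + fuel) (max d (Nat.log2 (l + 1) + 1)) := by
  intro fuel
  induction fuel with
  | zero => intro d; simp [mydepthGo]
  | succ n ih =>
    intro d
    rw [mydepthGo]
    by_cases h : (2:Int) ^ d - 1 > (l : Int)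
    · rw [if_pos h]
      have hb := (pv_cond_iff l d).mp h
      omega
    · rw [if_neg h]
      rw [ih (d + 1)]
      have hb : ¬ Nat.log2 (l + 1) + 1 ≤ d := fun hc => h ((pv_cond_iff l d).mpr hc)
      omega

-- ===== VERDICT (by name: the statement is the Claim_ definition above) =====
theorem mydepth_spec : Claim_equal_mydepth := by
  intro tree _
  unfold Spec_mydepth mydepth mydepth_alt
  rw [pv_go_eq]
  simp
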